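-- pv_equiv track=rewrite | github.com/petertimperman/TgFinder | processing.py | suggest_overall_interest_regions
-- ===== SOURCE A (Python) =====
-- def suggest_overall_interest_regions(change_list):
--     zero_regions = []
--
--     for pair in change_list:
--         if pair[0] == 0:
--             zero_regions.append(pair[1])
--     if len(zero_regions) == 1:
--         return zero_regions[0]
--     if len(zero_regions) > 1:
--         top_two = sorted(zero_regions, reverse=True, key=lambda region: region[1] - region[0])[0:2]
--         return (top_two[0][0], top_two[1][1])
--     else:
--         return (change_list[0][1][0], change_list[-1][1][1])
-- ===== SOURCE B (Python) =====
-- def suggest_overall_interest_regions(change_list):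
--     best = None
--     second = None
--     count = 0
--     for pair in change_list:
--         if pair[0] == 0:
--             region = pair[1]
--             count += 1
--             if best is None or region[1] - region[0] > best[1] - best[0]:
--                 second = best
--                 best = region
--             elif second is None or region[1] - region[0] > second[1] - second[0]:
--                 second = region
--     if count == 1:
--         return best
--     if count > 1:
--         return (best[0], second[1])
--     return (change_list[0][1][0], change_list[-1][1][1])
-- ===== Notes on version B (the rewrite author's own statement) =====
-- stated objective: faster
-- what changed: Replaced building the zero-region list, stable-sorting it by size and slicing the top two with a single linear scan over change_list that maintains the best and second-best region (strict > comparisons reproduce the stable sort's tie order).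
import Mathlib
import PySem

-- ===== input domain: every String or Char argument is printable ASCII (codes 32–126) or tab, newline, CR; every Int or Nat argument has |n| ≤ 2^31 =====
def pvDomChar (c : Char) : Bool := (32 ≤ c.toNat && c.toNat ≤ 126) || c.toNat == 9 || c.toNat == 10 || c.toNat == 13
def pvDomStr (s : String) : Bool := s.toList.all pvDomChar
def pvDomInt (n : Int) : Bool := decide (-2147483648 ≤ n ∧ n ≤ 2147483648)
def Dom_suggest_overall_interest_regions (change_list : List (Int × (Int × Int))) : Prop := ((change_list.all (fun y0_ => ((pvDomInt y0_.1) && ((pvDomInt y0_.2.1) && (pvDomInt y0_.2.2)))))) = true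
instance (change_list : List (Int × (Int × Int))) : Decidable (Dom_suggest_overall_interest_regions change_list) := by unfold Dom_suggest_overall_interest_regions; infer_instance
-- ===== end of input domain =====

-- B replaces A's "sort all zero-flagged regions, take top two" by a single linear scan
-- maintaining the best and second-best region (strict comparisons preserve the stable
-- sort's tie order); objective: faster (no sort, no intermediate list).
-- Pre_ excludes only the empty list, on which A raises IndexError (change_list[0]).


-- ===== PORT A =====
def suggest_overall_interest_regions (change_list : List (Int × (Int × Int))) : Int × Int :=
  let zero_regions : List (Int × Int) :=
    change_list.foldl (fun acc pair => if pair.1 = 0 then acc ++ [pair.2] else acc) []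
  if PySem.List.len zero_regions = 1 then
    PySem.List.pyGetD zero_regions 0 (0, 0)
  else if 1 < PySem.List.len zero_regions then
    let top_two :=
      PySem.List.slice (PySem.List.sorted zero_regions (fun region => region.2 - region.1) true)
        (some 0) (some 2)
    ((PySem.List.pyGetD top_two 0 (0, 0)).1, (PySem.List.pyGetD top_two 1 (0, 0)).2)
  else
    ((PySem.List.pyGetD change_list 0 (0, (0, 0))).2.1,
     (PySem.List.pyGetD change_list (-1) (0, (0, 0))).2.2)

-- ===== PORT B =====
-- B-side helper: process one zero-flagged region, updating (count, best, second).
def pvRegStep (st : Int × Option (Int × Int) × Option (Int × Int)) (region : Int × Int) :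
    Int × Option (Int × Int) × Option (Int × Int) :=
  match st with
  | (count, best, second) =>
    match best with
    | none => (count + 1, some region, none)
    | some b =>
      if region.2 - region.1 > b.2 - b.1 then (count + 1, some region, some b)
      else
        match second with
        | none => (count + 1, some b, some region)
        | some s =>
          if region.2 - region.1 > s.2 - s.1 then (count + 1, some b, some region)
          else (count + 1, some b, some s)

def pvAltStep (st : Int × Option (Int × Int) × Option (Int × Int)) (pair : Int × (Int × Int)) :
    Int × Option (Int × Int) × Option (Int × Int) :=
  if pair.1 = 0 then pvRegStep st pair.2 else st

def suggest_overall_interest_regions_alt (change_list : List (Int × (Int × Int))) : Int × Int :=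
  let st := change_list.foldl pvAltStep (0, none, none)
  if st.1 = 1 then st.2.1.getD (0, 0)
  else if 1 < st.1 then ((st.2.1.getD (0, 0)).1, (st.2.2.getD (0, 0)).2)
  else
    ((PySem.List.pyGetD change_list 0 (0, (0, 0))).2.1,
     (PySem.List.pyGetD change_list (-1) (0, (0, 0))).2.2)

-- ===== PRECONDITION & SPEC =====
-- Pre_ excludes exactly the empty list: there A raises IndexError on change_list[0].
def Pre_suggest_overall_interest_regions (change_list : List (Int × (Int × Int))) : Prop :=
  change_list ≠ []
instance (change_list : List (Int × (Int × Int))) : Decidable (Pre_suggest_overall_interest_regions change_list) := by unfold Pre_suggest_overall_interest_regions; infer_instance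

def pvWitness_suggest_overall_interest_regions : (List (Int × (Int × Int))) := [(0, (0, 1))]

def Spec_suggest_overall_interest_regions (change_list : List (Int × (Int × Int))) (out : Int × Int) : Prop := out = suggest_overall_interest_regions_alt change_list
instance (change_list : List (Int × (Int × Int))) (out : Int × Int) : Decidable (Spec_suggest_overall_interest_regions change_list out) := by unfold Spec_suggest_overall_interest_regions; infer_instance

-- ===== CLAIM (what is proved, stated in full; the proofs are below) =====
def Claim_equal_suggest_overall_interest_regions : Prop := ∀ (change_list : List (Int × (Int × Int))), Dom_suggest_overall_interest_regions change_list → Pre_suggest_overall_interest_regions change_list → Spec_suggest_overall_interest_regions change_list (suggest_overall_interest_regions change_list)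

-- ===== LEMMAS AND PROOFS =====

-- the list of zero-flagged regions, as a filterMap
def pvZs (change_list : List (Int × (Int × Int))) : List (Int × Int) :=
  change_list.filterMap (fun pair => if pair.1 = 0 then some pair.2 else none)

-- scan step on a (best, second) pair
def pvPairStep (p : (Int × Int) × (Int × Int)) (r : Int × Int) : (Int × Int) × (Int × Int) :=
  if r.2 - r.1 > p.1.2 - p.1.1 then (r, p.1)
  else if r.2 - r.1 > p.2.2 - p.2.1 then (p.1, r)
  else p

lemma pvFoldA (change_list : List (Int × (Int × Int))) :
    ∀ acc : List (Int × Int),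
      change_list.foldl (fun acc pair => if pair.1 = 0 then acc ++ [pair.2] else acc) acc
        = acc ++ pvZs change_list := by
  induction change_list with
  | nil => intro acc; simp [pvZs]
  | cons p cl ih =>
    intro acc
    by_cases h : p.1 = 0 <;> simp [pvZs, h, ih, List.append_assoc]
  
lemma pvFoldB (change_list : List (Int × (Int × Int))) :
    ∀ st, change_list.foldl pvAltStep st = (pvZs change_list).foldl pvRegStep st := by
  induction change_list with
  | nil => intro st; simp [pvZs]
  | cons p cl ih =>
    intro st
    by_cases h : p.1 = 0 <;> simp [pvZs, h, ih, pvAltStep]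

lemma pvRegStep_some (c : Int) (a b r : Int × Int) :
    pvRegStep (c, some a, some b) r
      = (c + 1, some (pvPairStep (a, b) r).1, some (pvPairStep (a, b) r).2) := by
  simp only [pvRegStep, pvPairStep]
  split_ifs <;> rfl

lemma pvScanB (l : List (Int × Int)) :
    ∀ (c : Int) (a b : Int × Int),
      l.foldl pvRegStep (c, some a, some b)
        = (c + l.length, some (l.foldl pvPairStep (a, b)).1, some (l.foldl pvPairStep (a, b)).2) := by
  induction l with
  | nil => intro c a b; simp
  | cons x l ih =>
    intro c a b
    rw [List.foldl_cons, List.foldl_cons, pvRegStep_some, ih]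
    have hn : c + 1 + (l.length : Int) = c + ((x :: l).length : Int) := by
      simp only [List.length_cons]; push_cast; ring
    rw [hn]

lemma pvInsTop2 (l : List (Int × Int)) :
    ∀ (a b : Int × Int) (t : List (Int × Int)),
      ∃ t', l.foldl
          (fun acc x =>
            PySem.List.insertBy (fun a b => decide (b.2 - b.1 < a.2 - a.1)) x acc)
          (a :: b :: t)
        = (l.foldl pvPairStep (a, b)).1 :: (l.foldl pvPairStep (a, b)).2 :: t' := by
  induction l with
  | nil => intro a b t; exact ⟨t, rfl⟩
  | cons x l ih =>
    intro a b t
    have hins : PySem.List.insertBy (fun a b => decide (b.2 - b.1 < a.2 - a.1)) x (a :: b :: t)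
        = if a.2 - a.1 < x.2 - x.1 then x :: a :: b :: t
          else if b.2 - b.1 < x.2 - x.1 then a :: x :: b :: t
          else a :: b :: PySem.List.insertBy (fun a b => decide (b.2 - b.1 < a.2 - a.1)) x t := by
      by_cases h1 : a.2 - a.1 < x.2 - x.1 <;> by_cases h2 : b.2 - b.1 < x.2 - x.1 <;>
        simp [PySem.List.insertBy, h1, h2]
    simp only [List.foldl_cons, hins, pvPairStep]
    by_cases h1 : a.2 - a.1 < x.2 - x.1
    · simpa [h1, gt_iff_lt] using ih x a (b :: t)
    · by_cases h2 : b.2 - b.1 < x.2 - x.1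
      · simpa [h1, h2, gt_iff_lt] using ih a x (b :: t)
      · simpa [h1, h2, gt_iff_lt] using
          ih a b (PySem.List.insertBy (fun a b => decide (b.2 - b.1 < a.2 - a.1)) x t)

-- ===== VERDICT (by name: the statement is the Claim_ definition above) =====
theorem suggest_overall_interest_regions_spec : Claim_equal_suggest_overall_interest_regions := by
  intro cl _ _
  unfold Spec_suggest_overall_interest_regions
  unfold suggest_overall_interest_regions suggest_overall_interest_regions_alt
  rw [pvFoldA cl [], pvFoldB cl, List.nil_append]
  rcases hzs : pvZs cl with _ | ⟨r0, zs'⟩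
  · simp
  · rcases zs' with _ | ⟨r1, rest⟩
    · simp [pvRegStep]
    · -- at least two zero regions
      simp only [PySem.List.len_eq, List.length_cons]
      have hlen1 : ¬ ((rest.length : Int) + 1 + 1 = 1) := by omega
      have hlen2 : (1 : Int) < (rest.length : Int) + 1 + 1 := by omega
      rw [if_neg (by exact_mod_cast hlen1), if_pos (by exact_mod_cast hlen2)]
      -- B side: unfold the first two scan steps
      simp only [List.foldl_cons, pvRegStep]
      -- A side: sorted → foldl insertBy
      rw [PySem.List.sorted_rev_eq_foldl_insertBy]
      simp only [List.foldl_cons]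
      have hbase : PySem.List.insertBy
            (fun a b => decide ((fun region => region.2 - region.1) b < (fun region => region.2 - region.1) a)) r1
            (PySem.List.insertBy
              (fun a b => decide ((fun region => region.2 - region.1) b < (fun region => region.2 - region.1) a)) r0 [])
          = if r0.2 - r0.1 < r1.2 - r1.1 then r1 :: r0 :: ([] : List (Int × Int))
            else r0 :: r1 :: ([] : List (Int × Int)) := by
        by_cases h : r0.2 - r0.1 < r1.2 - r1.1 <;> simp [PySem.List.insertBy, h]
      rw [hbase]
      simp only [gt_iff_lt]
      have hc1 : ¬ ((2:Int) + (rest.length : Int) = 1) := by omega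
      have hc2 : ((1:Int) < (2:Int) + (rest.length : Int)) := by omega
      by_cases h : r0.2 - r0.1 < r1.2 - r1.1
      · rw [if_pos h, if_pos h]
        obtain ⟨t', ht'⟩ := pvInsTop2 rest r1 r0 []
        have ht'' : List.foldl
            (fun acc x =>
              PySem.List.insertBy (fun a b =>
                decide ((fun region => region.2 - region.1) b < (fun region => region.2 - region.1) a)) x acc)
            (r1 :: r0 :: []) rest
            = (rest.foldl pvPairStep (r1, r0)).1 :: (rest.foldl pvPairStep (r1, r0)).2 :: t' := ht'
        rw [ht'', show ((0:Int) + 1 + 1) = 2 from by norm_num, pvScanB rest 2 r1 r0,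
          PySem.List.slice_zero_start, PySem.List.slice_to _ (by norm_num : (0:Int) ≤ 2)]
        dsimp only
        rw [if_neg hc1, if_pos hc2]
        norm_num [PySem.List.pyGetD, pysem]
      · rw [if_neg h, if_neg h]
        obtain ⟨t', ht'⟩ := pvInsTop2 rest r0 r1 []
        have ht'' : List.foldl
            (fun acc x =>
              PySem.List.insertBy (fun a b =>
                decide ((fun region => region.2 - region.1) b < (fun region => region.2 - region.1) a)) x acc)
            (r0 :: r1 :: []) rest
            = (rest.foldl pvPairStep (r0, r1)).1 :: (rest.foldl pvPairStep (r0, r1)).2 :: t' := ht'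
        rw [ht'', show ((0:Int) + 1 + 1) = 2 from by norm_num, pvScanB rest 2 r0 r1,
          PySem.List.slice_zero_start, PySem.List.slice_to _ (by norm_num : (0:Int) ≤ 2)]
        dsimp only
        rw [if_neg hc1, if_pos hc2]
        norm_num [PySem.List.pyGetD, pysem]
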